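-- pv_equiv track=rewrite | github.com/derBobo/AOC | 2023/d07/d07.py | cards_to_index_part2
-- ===== SOURCE A (Python) =====
-- from collections import Counter
--
-- def cards_to_index_part2(cards):
--     cards = [x if x != 11 else 1 for x in cards]
--
--     counts = Counter([x for x in cards if x != 1])
--     value = 0
--     most_common=cards.count(1)
--     if len(counts)>0:
--         most_common += counts.most_common(1)[0][1]
--         if len(counts) > 1:
--             second_common = counts.most_common(2)[1][1]
--     match most_common:
--         case 1:
--             value += 10000000000
--             if counts[1] == 1:
--                 value
--         case 2:
--             value += 20000000000
--             if second_common == 2: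
--                 value += 10000000000
--         case 3:
--             value += 40000000000
--             if second_common == 2:
--                 value += 10000000000
--         case 4:
--             value += 60000000000
--         case 5:
--             value += 70000000000
--     for i in range(5):
--         value += cards[i] * (100 ** (4 - i))
--     return value
-- ===== SOURCE B (Python) =====
-- def cards_to_index_part2(cards):
--     cards = [1 if x == 11 else x for x in cards]
--     counts = {}
--     for x in cards:
--         if x != 1:
--             counts[x] = counts.get(x, 0) + 1
--     sig = sorted(counts.values(), reverse=True)
--     if sig:
--         sig[0] += cards.count(1)
--     else:
--         sig = [5]
--     value = {
--         (5,): 70000000000,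
--         (4, 1): 60000000000,
--         (3, 2): 50000000000,
--         (3, 1, 1): 40000000000,
--         (2, 2, 1): 30000000000,
--         (2, 1, 1, 1): 20000000000,
--         (1, 1, 1, 1, 1): 10000000000,
--     }[tuple(sig)]
--     for i, c in enumerate(cards):
--         value += c * 100 ** (4 - i)
--     return value
-- ===== Notes on version B (the rewrite author's own statement) =====
-- stated objective: simpler
-- what changed: Replaces the match on most_common plus the separately-tracked second_common with a single count-signature (sorted multiplicities, jokers added to the top) looked up in a dict of the seven hand types; the base-100 positional tiebreak is unchanged.
-- outside the precondition, e.g. on cards_to_index_part2([2, 2, 3, 3, 4, 4]): A returns 30202030304, B raises KeyError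
import Mathlib
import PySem

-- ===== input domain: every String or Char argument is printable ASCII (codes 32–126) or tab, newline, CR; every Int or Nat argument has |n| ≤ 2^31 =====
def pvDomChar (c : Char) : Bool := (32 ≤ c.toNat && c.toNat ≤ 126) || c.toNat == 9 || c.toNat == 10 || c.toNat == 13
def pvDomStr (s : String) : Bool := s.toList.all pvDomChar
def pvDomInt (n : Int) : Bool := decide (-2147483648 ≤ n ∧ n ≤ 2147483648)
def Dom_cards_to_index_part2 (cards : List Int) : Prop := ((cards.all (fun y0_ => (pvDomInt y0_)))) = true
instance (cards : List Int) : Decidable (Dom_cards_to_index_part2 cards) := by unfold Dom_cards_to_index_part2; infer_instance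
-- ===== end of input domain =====

-- B replaces A's match on most_common / second_common by one sorted count-signature (jokers folded
-- into the top count) looked up in a table of the seven hand types; objective: simpler.


-- ===== PORT A =====
def cards_to_index_part2 (cards : List Int) : Int :=
  let cs := cards.map (fun x => if x ≠ 11 then x else 1)
  let counts := PySem.Dict.counter (cs.filter (fun x => x ≠ 1))
  let value : Int := 0
  let most_common : Int := (cs.count 1 : Int)
  let mc := PySem.List.sorted counts.items (fun p => p.2) true
  let most_common := if counts.size > 0 then most_common + (mc.getD 0 (0, 0)).2 else most_common
  let second_common : Int := if counts.size > 1 then (mc.getD 1 (0, 0)).2 else 0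
  let value :=
    if most_common = 1 then value + 10000000000
    else if most_common = 2 then
      value + 20000000000 + (if second_common = 2 then 10000000000 else 0)
    else if most_common = 3 then
      value + 40000000000 + (if second_common = 2 then 10000000000 else 0)
    else if most_common = 4 then value + 60000000000
    else if most_common = 5 then value + 70000000000
    else value
  (PySem.List.pyRange 0 5 1).foldl
    (fun v i => v + (PySem.List.pyGetD cs i 0) * (100 : Int) ^ (4 - i).toNat) value

-- ===== PORT B =====
def cards_to_index_part2_alt (cards : List Int) : Int :=
  let cs := cards.map (fun x => if x = 11 then 1 else x)
  let counts := cs.foldl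
    (fun d x => if x ≠ 1 then d.insert x (d.getD x 0 + 1) else d) (PySem.Dict.empty : PySem.Dict Int Int)
  let sig := PySem.List.sorted counts.values (fun v => v) true
  let sig := if sig = [] then [(5 : Int)]
    else (sig.headD 0 + (cs.count 1 : Int)) :: sig.tail
  let table : List (List Int × Int) :=
    [([5], 70000000000), ([4, 1], 60000000000), ([3, 2], 50000000000),
     ([3, 1, 1], 40000000000), ([2, 2, 1], 30000000000),
     ([2, 1, 1, 1], 20000000000), ([1, 1, 1, 1, 1], 10000000000)]
  let value := ((table.find? (fun p => p.1 = sig)).map (fun p => p.2)).getD 0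
  (PySem.List.enumerate cs 0).foldl (fun v p => v + p.2 * (100 : Int) ^ ((4 : Int) - p.1).toNat) value

-- ===== PRECONDITION & SPEC =====
-- Pre_ restricts to the natural domain of a poker hand, exactly 5 cards: on fewer cards A raises
-- IndexError; on more than 5 cards A still returns, but mixes counts over all cards with a
-- positional tiebreak over the first five only — an accident of the implementation (B raises
-- KeyError there, its signature never summing to 5).
def Pre_cards_to_index_part2 (cards : List Int) : Prop := cards.length = 5
instance (cards : List Int) : Decidable (Pre_cards_to_index_part2 cards) := by
  unfold Pre_cards_to_index_part2; infer_instance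
def pvWitness_cards_to_index_part2 : List Int := [11, 2, 2, 3, 3]

def Spec_cards_to_index_part2 (cards : List Int) (out : Int) : Prop := out = cards_to_index_part2_alt cards
instance (cards : List Int) (out : Int) : Decidable (Spec_cards_to_index_part2 cards out) := by
  unfold Spec_cards_to_index_part2; infer_instance

-- ===== CLAIM (what is proved, stated in full; the proofs are below) =====
def Claim_equal_cards_to_index_part2 : Prop := ∀ (cards : List Int), Dom_cards_to_index_part2 cards → Pre_cards_to_index_part2 cards → Spec_cards_to_index_part2 cards (cards_to_index_part2 cards)

-- ===== LEMMAS AND PROOFS =====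

theorem pv_classify (sig : List Int) (j : Int)
    (hs : sig.Pairwise (fun a b => b ≤ a))
    (h1 : ∀ v ∈ sig, 1 ≤ v)
    (hsum : sig.sum + j = 5) (hj : 0 ≤ j) :
    (if (if sig.length > 0 then j + sig.getD 0 0 else j) = 1 then (0 : Int) + 10000000000
     else if (if sig.length > 0 then j + sig.getD 0 0 else j) = 2 then
       0 + 20000000000 + (if (if sig.length > 1 then sig.getD 1 0 else 0) = 2 then 10000000000 else 0)
     else if (if sig.length > 0 then j + sig.getD 0 0 else j) = 3 then
       0 + 40000000000 + (if (if sig.length > 1 then sig.getD 1 0 else 0) = 2 then 10000000000 else 0)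
     else if (if sig.length > 0 then j + sig.getD 0 0 else j) = 4 then 0 + 60000000000
     else if (if sig.length > 0 then j + sig.getD 0 0 else j) = 5 then 0 + 70000000000
     else 0)
    = ((([(([5] : List Int), (70000000000 : Int)), ([4, 1], 60000000000), ([3, 2], 50000000000),
          ([3, 1, 1], 40000000000), ([2, 2, 1], 30000000000),
          ([2, 1, 1, 1], 20000000000), ([1, 1, 1, 1, 1], 10000000000)] : List (List Int × Int)).find?
          (fun p => p.1 = (if sig = [] then [(5 : Int)] else (sig.headD 0 + j) :: sig.tail))).map
        (fun p => p.2)).getD 0 := by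
  rcases sig with _ | ⟨s0, _ | ⟨s1, _ | ⟨s2, _ | ⟨s3, _ | ⟨s4, _ | ⟨s5, rest⟩⟩⟩⟩⟩⟩
  · have h5 : j = 5 := by simpa using hsum
    subst h5; decide
  · have h0 : 1 ≤ s0 := h1 s0 (by simp)
    simp only [List.sum_cons, List.sum_nil] at hsum
    have hu : s0 ≤ 5 := by omega
    have hju : j ≤ 5 := by omega
    interval_cases s0 <;> interval_cases j <;> first | (exfalso; omega) | decide
  · have h0 : 1 ≤ s0 := h1 s0 (by simp)
    have hb : 1 ≤ s1 := h1 s1 (by simp)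
    have ho : s1 ≤ s0 := by simp only [List.pairwise_cons] at hs; exact hs.1 s1 (by simp)
    simp only [List.sum_cons, List.sum_nil] at hsum
    have : s0 ≤ 4 := by omega
    have hju : j ≤ 5 := by omega
    interval_cases s0 <;> interval_cases s1 <;> interval_cases j <;> first | (exfalso; omega) | decide
  · have h0 : 1 ≤ s0 := h1 s0 (by simp)
    have hb : 1 ≤ s1 := h1 s1 (by simp)
    have hc : 1 ≤ s2 := h1 s2 (by simp)
    simp only [List.pairwise_cons] at hs
    have ho1 : s1 ≤ s0 := hs.1 s1 (by simp)
    have ho2 : s2 ≤ s1 := hs.2.1 s2 (by simp)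
    simp only [List.sum_cons, List.sum_nil] at hsum
    have : s0 ≤ 3 := by omega
    have hju : j ≤ 5 := by omega
    interval_cases s0 <;> interval_cases s1 <;> interval_cases s2 <;> interval_cases j <;>
      first | (exfalso; omega) | decide
  · have h0 : 1 ≤ s0 := h1 s0 (by simp)
    have hb : 1 ≤ s1 := h1 s1 (by simp)
    have hc : 1 ≤ s2 := h1 s2 (by simp)
    have hd : 1 ≤ s3 := h1 s3 (by simp)
    simp only [List.pairwise_cons] at hs
    have ho1 : s1 ≤ s0 := hs.1 s1 (by simp)
    have ho2 : s2 ≤ s1 := hs.2.1 s2 (by simp)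
    have ho3 : s3 ≤ s2 := hs.2.2.1 s3 (by simp)
    simp only [List.sum_cons, List.sum_nil] at hsum
    have : s0 ≤ 2 := by omega
    have hju : j ≤ 5 := by omega
    interval_cases s0 <;> interval_cases s1 <;> interval_cases s2 <;> interval_cases s3 <;>
      interval_cases j <;> first | (exfalso; omega) | decide
  · have h0 : 1 ≤ s0 := h1 s0 (by simp)
    have hb : 1 ≤ s1 := h1 s1 (by simp)
    have hc : 1 ≤ s2 := h1 s2 (by simp)
    have hd : 1 ≤ s3 := h1 s3 (by simp)
    have he : 1 ≤ s4 := h1 s4 (by simp)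
    simp only [List.pairwise_cons] at hs
    have ho1 : s1 ≤ s0 := hs.1 s1 (by simp)
    have ho2 : s2 ≤ s1 := hs.2.1 s2 (by simp)
    have ho3 : s3 ≤ s2 := hs.2.2.1 s3 (by simp)
    have ho4 : s4 ≤ s3 := hs.2.2.2.1 s4 (by simp)
    simp only [List.sum_cons, List.sum_nil] at hsum
    have : s0 ≤ 1 := by omega
    have hju : j ≤ 5 := by omega
    interval_cases s0 <;> interval_cases s1 <;> interval_cases s2 <;> interval_cases s3 <;>
      interval_cases s4 <;> interval_cases j <;> first | (exfalso; omega) | decide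
  · exfalso
    have h0 : 1 ≤ s0 := h1 s0 (by simp)
    have hb : 1 ≤ s1 := h1 s1 (by simp)
    have hc : 1 ≤ s2 := h1 s2 (by simp)
    have hd : 1 ≤ s3 := h1 s3 (by simp)
    have he : 1 ≤ s4 := h1 s4 (by simp)
    have hf : 1 ≤ s5 := h1 s5 (by simp)
    have hr : 0 ≤ rest.sum :=
      List.sum_nonneg (fun x hx => le_trans (by norm_num) (h1 x (by simp [hx])))
    simp only [List.sum_cons] at hsum
    omega

-- the identical base-100 positional tiebreak, computed by A over range(5) and by B over enumerate
theorem pv_tie (l : List Int) (h : l.length = 5) (V : Int) :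
    (PySem.List.pyRange 0 5 1).foldl
        (fun v i => v + (PySem.List.pyGetD l i 0) * (100 : Int) ^ (4 - i).toNat) V
      = (PySem.List.enumerate l 0).foldl
        (fun v p => v + p.2 * (100 : Int) ^ ((4 : Int) - p.1).toNat) V := by
  rcases l with _ | ⟨a, _ | ⟨b, _ | ⟨c, _ | ⟨d, _ | ⟨e, _ | ⟨f, t⟩⟩⟩⟩⟩⟩ <;> simp_all
  rw [show PySem.List.pyRange 0 5 1 = [0, 1, 2, 3, 4] from by decide]
  simp [PySem.List.pyGetD, PySem.List.pyGet?, PySem.List.pyIdx?]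

theorem pv_count_filter (cs : List Int) :
    cs.count 1 + (cs.filter (fun x => decide (x ≠ 1))).length = cs.length := by
  induction cs with
  | nil => simp
  | cons a t ih =>
    simp only [List.count_cons, List.filter_cons, ne_eq, decide_not] at *
    by_cases h : a = 1 <;> simp [h] <;> omega

theorem pv_snd_getD_map (l : List (Int × Int)) (n : Nat) (d : Int × Int) :
    (l.getD n d).2 = (l.map (fun p => p.2)).getD n d.2 := by
  simp [List.getD_eq_getElem?_getD, List.getElem?_map]

theorem pv_map_insertBy {α κ : Type} [LinearOrder κ] (key : α → κ) (x : α) (ys : List α) :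
    (PySem.List.insertBy (fun a b => decide (key b < key a)) x ys).map key
      = PySem.List.insertBy (fun a b => decide (b < a)) (key x) (ys.map key) := by
  induction ys with
  | nil => simp [PySem.List.insertBy]
  | cons y t ih =>
    simp only [PySem.List.insertBy, List.map_cons]
    split <;> simp_all [List.map_cons]

theorem pv_map_sorted_rev {α κ : Type} [LinearOrder κ] (xs : List α) (key : α → κ) :
    (PySem.List.sorted xs key true).map key
      = PySem.List.sorted (xs.map key) (fun v => v) true := by
  rw [PySem.List.sorted_rev_eq_foldl_insertBy, PySem.List.sorted_rev_eq_foldl_insertBy]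
  suffices h : ∀ acc : List α,
      (xs.foldl (fun acc x => PySem.List.insertBy (fun a b => decide (key b < key a)) x acc) acc).map key
        = (xs.map key).foldl (fun acc v => PySem.List.insertBy (fun a b => decide (b < a)) v acc) (acc.map key) by
    simpa using h []
  induction xs with
  | nil => simp
  | cons x t ih => intro acc; simp only [List.foldl_cons, List.map_cons, ih, pv_map_insertBy]

-- counting fold with guard = counter of the filtered list
theorem pv_fold_counter (cs : List Int) :
    cs.foldl (fun d x => if x ≠ 1 then d.insert x (d.getD x 0 + 1) else d)
        (PySem.Dict.empty : PySem.Dict Int Int)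
      = PySem.Dict.counter (cs.filter (fun x => x ≠ 1)) := by
  rw [← PySem.Dict.foldl_insert_getD_add_one_eq_counter, List.foldl_filter]
  simp

theorem pv_main (cards : List Int) (hpre : cards.length = 5) :
    cards_to_index_part2 cards = cards_to_index_part2_alt cards := by
  have hmap : cards.map (fun x => if x ≠ 11 then x else 1)
      = cards.map (fun x => if x = 11 then 1 else x) := by
    apply List.map_congr_left; intro x _; by_cases h : x = 11 <;> simp [h]
  simp only [cards_to_index_part2, cards_to_index_part2_alt, hmap, pv_fold_counter]
  set cs := cards.map (fun x => if x = 11 then 1 else x) with hcs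
  set nonj := cs.filter (fun x => x ≠ 1) with hnonj
  set ctr := PySem.Dict.counter nonj with hctr
  set S := PySem.List.sorted ctr.values (fun v => v) true with hS
  have hvals : ctr.values = ctr.items.map (fun p => p.2) := rfl
  have hms : (PySem.List.sorted ctr.items (fun p => p.2) true).map (fun p => p.2) = S := by
    rw [hS, hvals]; exact pv_map_sorted_rev ctr.items (fun p => p.2)
  have hget0 : ((PySem.List.sorted ctr.items (fun p => p.2) true).getD 0 ((0 : Int), (0 : Int))).2
      = S.getD 0 0 := by rw [pv_snd_getD_map, hms]
  have hget1 : ((PySem.List.sorted ctr.items (fun p => p.2) true).getD 1 ((0 : Int), (0 : Int))).2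
      = S.getD 1 0 := by rw [pv_snd_getD_map, hms]
  have hsize : ctr.size = S.length := by
    rw [hS, PySem.List.length_sorted, hvals, List.length_map]
    rfl
  have hpair : S.Pairwise (fun a b => b ≤ a) := by
    rw [hS]; exact PySem.List.sorted_pairwise_rev _ _
  have hone : ∀ v ∈ S, 1 ≤ v := by
    intro v hv
    rw [hS, PySem.List.mem_sorted, hvals, hctr, PySem.Dict.items_counter, List.map_map] at hv
    rcases List.mem_map.mp hv with ⟨k, hk, rfl⟩
    have hmem : k ∈ nonj := (PySem.Set.mem_ofList _ _).mp hk
    have hpos := List.count_pos_iff.mpr hmem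
    simp only [Function.comp]
    omega
  have hlen5 : cs.length = 5 := by rw [hcs, List.length_map, hpre]
  have hsum : S.sum + (cs.count 1 : Int) = 5 := by
    have h1 : S.sum = ctr.values.sum := by
      rw [hS]; exact (PySem.List.sorted_perm _ _ _).sum_eq
    have hperm : (PySem.Set.ofList nonj).Perm nonj.dedup :=
      (List.perm_ext_iff_of_nodup (PySem.Set.nodup_ofList _) nonj.nodup_dedup).mpr
        (fun a => by simp [PySem.Set.mem_ofList, List.mem_dedup])
    have h2 : ctr.values.sum = (nonj.length : Int) := by
      rw [hvals, hctr, PySem.Dict.items_counter, List.map_map]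
      have h3 := (hperm.map (fun k => (List.count k nonj : Int))).sum_eq
      have h4 : ((fun p : Int × Int => p.2) ∘ fun k => (k, (List.count k nonj : Int)))
          = fun k => (List.count k nonj : Int) := rfl
      rw [h4, h3]
      have h5 : (nonj.dedup.map (fun k => (List.count k nonj : Int)))
          = (nonj.dedup.map (fun k => List.count k nonj)).map (fun n : Nat => (n : Int)) := by
        rw [List.map_map]; rfl
      rw [h5, ← Nat.cast_list_sum, List.sum_map_count_dedup_eq_length]
    have h6 := pv_count_filter cs
    rw [h1, h2]
    rw [hlen5] at h6
    have : nonj.length = (cs.filter (fun x => decide (x ≠ 1))).length := rfl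
    omega
  have hj0 : (0 : Int) ≤ (cs.count 1 : Int) := by positivity
  have hclass := pv_classify S (cs.count 1) hpair hone hsum hj0
  rw [hget0, hget1, hsize, hclass]
  exact pv_tie cs hlen5 _

-- ===== VERDICT (by name: the statement is the Claim_ definition above) =====
theorem cards_to_index_part2_spec : Claim_equal_cards_to_index_part2 := by
  intro cards _ hpre
  exact pv_main cards hpre
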